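-- pv_equiv track=rewrite | github.com/supermari0/cs224NFinal | classify.py | pos_trigram_feature_dict
-- ===== SOURCE A (Python) =====
-- def pos_trigram_feature_dict(pos_trigrams_dict, token_tuples):
--     """ Helper function for pos_trigram_features. """
--     for i in range(2, len(token_tuples)):
--         pos = token_tuples[i][1]
--         prev_pos = token_tuples[i-1][1]
--         prev2_pos = token_tuples[i-2][1]
--         pos_trigram = prev2_pos + '+' + prev_pos + '+' + pos
--         if pos_trigram in pos_trigrams_dict:
--             pos_trigrams_dict[pos_trigram] = 1
--     return pos_trigrams_dict
-- ===== SOURCE B (Python) =====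
-- def pos_trigram_feature_dict(pos_trigrams_dict, token_tuples):
--     """ Helper function for pos_trigram_features.
--     Inverted traversal: one pass over token positions builds the set of
--     present POS trigrams, then one pass over the dict keys marks the hits.
--     (Returns a new dict rather than mutating the argument in place.) """
--     present = {token_tuples[i - 2][1] + '+' + token_tuples[i - 1][1] + '+' + token_tuples[i][1]
--                for i in range(2, len(token_tuples))}
--     return {key: (1 if key in present else value)
--             for key, value in pos_trigrams_dict.items()}
-- ===== Notes on version B (the rewrite author's own statement) =====
-- stated objective: alternative
-- what changed: B inverts the traversal: instead of A's single loop over token positions that mutates the dict at each hit, B first builds the set of all POS trigrams present in the tokens and then rebuilds the dict in one pass over its keys, marking a key 1 exactly when it is in that set.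
import Mathlib
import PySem

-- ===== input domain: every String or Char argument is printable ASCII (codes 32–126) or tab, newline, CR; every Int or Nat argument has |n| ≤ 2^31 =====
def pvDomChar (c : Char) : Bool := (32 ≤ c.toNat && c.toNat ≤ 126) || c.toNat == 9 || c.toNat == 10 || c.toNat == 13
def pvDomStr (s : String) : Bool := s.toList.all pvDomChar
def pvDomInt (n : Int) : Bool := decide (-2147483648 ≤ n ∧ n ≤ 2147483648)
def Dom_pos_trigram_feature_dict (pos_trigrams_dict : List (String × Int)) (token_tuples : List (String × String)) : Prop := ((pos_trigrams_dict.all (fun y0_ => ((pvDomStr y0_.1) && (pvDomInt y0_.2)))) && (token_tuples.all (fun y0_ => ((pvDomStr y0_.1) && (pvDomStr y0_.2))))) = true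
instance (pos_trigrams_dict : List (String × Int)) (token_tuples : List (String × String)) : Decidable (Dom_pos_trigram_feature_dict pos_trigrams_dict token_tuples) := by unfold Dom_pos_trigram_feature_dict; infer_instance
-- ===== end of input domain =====

-- B inverts the traversal (set of present trigrams, then one pass over the dict keys);
-- equivalence is about the RETURN value only: Python A mutates its dict argument in place, B builds a new dict.


-- ===== PORT A =====
-- dict[k] = 1 on a key already present: overwrite the (unique) matching entry in place
def pvSetFirst : List (String × Int) → String → List (String × Int)
  | [], _ => []
  | (k, v) :: rest, t => if k == t then (k, 1) :: rest else (k, v) :: pvSetFirst rest t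

def pos_trigram_feature_dict (pos_trigrams_dict : List (String × Int)) (token_tuples : List (String × String)) : List (String × Int) :=
  (PySem.List.pyRange 2 (token_tuples.length : Int) 1).foldl (fun d i =>
    let pos := (PySem.List.pyGetD token_tuples i ("", "")).2
    let prev_pos := (PySem.List.pyGetD token_tuples (i - 1) ("", "")).2
    let prev2_pos := (PySem.List.pyGetD token_tuples (i - 2) ("", "")).2
    let pos_trigram := prev2_pos ++ "+" ++ prev_pos ++ "+" ++ pos
    if d.any (fun kv => kv.1 == pos_trigram) then pvSetFirst d pos_trigram else d)
    pos_trigrams_dict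

-- ===== PORT B =====
def pos_trigram_feature_dict_alt (pos_trigrams_dict : List (String × Int)) (token_tuples : List (String × String)) : List (String × Int) :=
  let present : PySem.Set String := PySem.Set.ofList
    ((PySem.List.pyRange 2 (token_tuples.length : Int) 1).map (fun i =>
      (PySem.List.pyGetD token_tuples (i - 2) ("", "")).2 ++ "+" ++
      (PySem.List.pyGetD token_tuples (i - 1) ("", "")).2 ++ "+" ++
      (PySem.List.pyGetD token_tuples i ("", "")).2))
  pos_trigrams_dict.map (fun kv => (kv.1, if PySem.Set.contains present kv.1 then 1 else kv.2))

-- ===== PRECONDITION & SPEC =====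
-- Pre_ excludes association lists with duplicate keys: they do not represent any Python dict
-- (A's first argument is a dict, whose keys are necessarily distinct), so A never receives them.
def Pre_pos_trigram_feature_dict (pos_trigrams_dict : List (String × Int)) (token_tuples : List (String × String)) : Prop :=
  (pos_trigrams_dict.map Prod.fst).Nodup
instance (pos_trigrams_dict : List (String × Int)) (token_tuples : List (String × String)) : Decidable (Pre_pos_trigram_feature_dict pos_trigrams_dict token_tuples) := by unfold Pre_pos_trigram_feature_dict; infer_instance

def pvWitness_pos_trigram_feature_dict : (List (String × Int)) × (List (String × String)) :=
  ([("N+V+N", 0), ("D+N+V", 7)], [("the", "D"), ("dog", "N"), ("runs", "V"), ("home", "N")])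

def Spec_pos_trigram_feature_dict (pos_trigrams_dict : List (String × Int)) (token_tuples : List (String × String)) (out : List (String × Int)) : Prop := out = pos_trigram_feature_dict_alt pos_trigrams_dict token_tuples
instance (pos_trigrams_dict : List (String × Int)) (token_tuples : List (String × String)) (out : List (String × Int)) : Decidable (Spec_pos_trigram_feature_dict pos_trigrams_dict token_tuples out) := by unfold Spec_pos_trigram_feature_dict; infer_instance

-- ===== CLAIM (what is proved, stated in full; the proofs are below) =====
def Claim_equal_pos_trigram_feature_dict : Prop := ∀ (pos_trigrams_dict : List (String × Int)) (token_tuples : List (String × String)), Dom_pos_trigram_feature_dict pos_trigrams_dict token_tuples → Pre_pos_trigram_feature_dict pos_trigrams_dict token_tuples → Spec_pos_trigram_feature_dict pos_trigrams_dict token_tuples (pos_trigram_feature_dict pos_trigrams_dict token_tuples)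

-- ===== LEMMAS AND PROOFS =====

-- the per-trigram loop body of A, with the trigram already computed
def pvStep (d : List (String × Int)) (t : String) : List (String × Int) :=
  if d.any (fun kv => kv.1 == t) then pvSetFirst d t else d

-- the per-entry marking function of B, with membership in a plain list of trigrams
def pvMark (ts : List String) (kv : String × Int) : String × Int :=
  (kv.1, if kv.1 ∈ ts then 1 else kv.2)

lemma pvSetFirst_keys (d : List (String × Int)) (t : String) :
    (pvSetFirst d t).map Prod.fst = d.map Prod.fst := by
  induction d with
  | nil => rfl
  | cons kv rest ih =>
    obtain ⟨k, v⟩ := kv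
    simp only [pvSetFirst]
    split <;> simp [ih]

lemma pvSetFirst_map_mark (d : List (String × Int)) (t : String) (ts : List String)
    (hnd : (d.map Prod.fst).Nodup) :
    (pvSetFirst d t).map (pvMark ts) = d.map (pvMark (t :: ts)) := by
  induction d with
  | nil => rfl
  | cons kv rest ih =>
    obtain ⟨k, v⟩ := kv
    simp only [List.map_cons, List.nodup_cons] at hnd
    by_cases hk : k = t
    · subst hk
      simp only [pvSetFirst, beq_self_eq_true, if_true, List.map_cons]
      congr 1
      · simp [pvMark]
      · apply List.map_congr_left
        intro kv hkv
        have hne : kv.1 ≠ k := by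
          intro h; exact hnd.1 (h ▸ List.mem_map_of_mem hkv)
        simp [pvMark, hne]
    · have hbeq : (k == t) = false := beq_false_of_ne hk
      simp only [pvSetFirst, hbeq, if_neg Bool.false_ne_true, List.map_cons]
      congr 1
      · simp [pvMark, hk]
      · exact ih hnd.2

lemma pvFoldl_step_eq (ts : List String) (d : List (String × Int))
    (hnd : (d.map Prod.fst).Nodup) :
    ts.foldl pvStep d = d.map (pvMark ts) := by
  induction ts generalizing d with
  | nil =>
    simp only [List.foldl_nil]
    exact (List.map_congr_left (fun kv _ => by simp [pvMark])).trans (List.map_id d) |>.symm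
  | cons t ts ih =>
    simp only [List.foldl_cons]
    by_cases h : d.any (fun kv => kv.1 == t)
    · have hstep : pvStep d t = pvSetFirst d t := by simp [pvStep, h]
      rw [hstep, ih _ (by rw [pvSetFirst_keys]; exact hnd),
          pvSetFirst_map_mark d t ts hnd]
    · have hstep : pvStep d t = d := by unfold pvStep; rw [if_neg h]
      rw [hstep, ih _ hnd]
      apply List.map_congr_left
      intro kv hkv
      have hne : kv.1 ≠ t := by
        intro he
        simp only [List.any_eq_true] at h
        exact h ⟨kv, hkv, by simp [he]⟩
      simp [pvMark, hne]

-- ===== VERDICT (by name: the statement is the Claim_ definition above) =====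
theorem pos_trigram_feature_dict_spec : Claim_equal_pos_trigram_feature_dict := by
  intro d tt _hdom hpre
  unfold Spec_pos_trigram_feature_dict
  unfold Pre_pos_trigram_feature_dict at hpre
  show (PySem.List.pyRange 2 (tt.length : Int) 1).foldl (fun d i => pvStep d
      ((PySem.List.pyGetD tt (i - 2) ("", "")).2 ++ "+" ++
       (PySem.List.pyGetD tt (i - 1) ("", "")).2 ++ "+" ++
       (PySem.List.pyGetD tt i ("", "")).2)) d =
    d.map (fun kv => (kv.1, if PySem.Set.contains (PySem.Set.ofList
      ((PySem.List.pyRange 2 (tt.length : Int) 1).map (fun i =>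
        (PySem.List.pyGetD tt (i - 2) ("", "")).2 ++ "+" ++
        (PySem.List.pyGetD tt (i - 1) ("", "")).2 ++ "+" ++
        (PySem.List.pyGetD tt i ("", "")).2))) kv.1 then 1 else kv.2))
  rw [← List.foldl_map, pvFoldl_step_eq _ d hpre]
  apply List.map_congr_left
  intro kv _
  rw [pvMark, PySem.Set.contains_eq_listContains, List.contains_eq_mem]
  simp only [decide_eq_true_eq, PySem.Set.mem_ofList]
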